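-- pv_equiv track=rewrite | github.com/Zenobia000/openclaw_media_hub | module_pack/module_06_notification/scheduled-notify/scripts/scheduler.py | _parse_cron_field
-- ===== SOURCE A (Python) =====
-- def _parse_cron_field(field: str, min_val: int, max_val: int) -> set[int]:
--     """Parse a single cron field into a set of matching integer values.
--
--     Supports: * (any), N (literal), N-M (range), N/S (step), N-M/S, */S,
--     and comma-separated combinations.
--     """
--     values: set[int] = set()
--     for part in field.split(","):
--         part = part.strip()
--         if "/" in part:
--             base, step_str = part.split("/", 1)
--             step = int(step_str)
--             if base == "*":
--                 start, end = min_val, max_val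
--             elif "-" in base:
--                 start, end = (int(x) for x in base.split("-", 1))
--             else:
--                 start, end = int(base), max_val
--             values.update(range(start, end + 1, step))
--         elif part == "*":
--             values.update(range(min_val, max_val + 1))
--         elif "-" in part:
--             lo, hi = (int(x) for x in part.split("-", 1))
--             values.update(range(lo, hi + 1))
--         else:
--             values.add(int(part))
--     return values
-- ===== SOURCE B (Python) =====
-- def _parse_cron_field(field: str, min_val: int, max_val: int) -> set[int]:
--     """Parse a single cron field into a set of matching integer values.
--
--     Recursive-descent over the comma-separated parts: each part is read with
--     partition (no membership tests, no branch-per-case set updates) into one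
--     flat value list, deduplicated once at the end.
--     """
--     def emit(parts):
--         if not parts:
--             return []
--         base, slash, step_str = parts[0].strip().partition("/")
--         step = int(step_str) if slash else 1
--         if base == "*":
--             start, end = min_val, max_val
--         else:
--             lo, dash, hi = base.partition("-")
--             start = int(lo)
--             end = int(hi) if dash else (max_val if slash else start)
--         return list(range(start, end + 1, step)) + emit(parts[1:])
--     return set(emit(field.split(",")))
-- ===== Notes on version B (the rewrite author's own statement) =====
-- stated objective: alternative
-- what changed: A's single loop with four membership-tested branches, each building and set-updating its own range, becomes a recursive descent over the comma parts that reads each part with str.partition (no 'in' tests, no per-branch updates), concatenates flat value lists, and deduplicates once with one set() at the end.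
import Mathlib
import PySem

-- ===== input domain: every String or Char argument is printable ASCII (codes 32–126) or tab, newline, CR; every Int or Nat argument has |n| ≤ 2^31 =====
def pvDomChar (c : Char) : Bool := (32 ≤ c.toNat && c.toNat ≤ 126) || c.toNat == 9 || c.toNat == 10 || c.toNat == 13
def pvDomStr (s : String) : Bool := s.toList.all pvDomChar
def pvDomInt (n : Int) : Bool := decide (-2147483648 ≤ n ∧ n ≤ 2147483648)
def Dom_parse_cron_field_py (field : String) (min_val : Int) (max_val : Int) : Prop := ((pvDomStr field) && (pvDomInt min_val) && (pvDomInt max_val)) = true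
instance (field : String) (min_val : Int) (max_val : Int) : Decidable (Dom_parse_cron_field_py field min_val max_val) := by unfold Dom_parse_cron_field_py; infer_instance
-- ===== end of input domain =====

-- B replaces A's loop of four membership-tested branches, each doing its own set update, by a
-- recursion over the comma parts that reads each part with str.partition into one flat value
-- list, deduplicated once by a single set() at the end (objective: alternative decomposition).

-- ===== PORT A =====
-- '/' in part and '-' in base are single-character membership tests, ported exactly as
-- List.contains on toList; int(...) is PySem.Int.ofStr?; split(sep, 1) is PySem.Str.splitMax?
-- (none / non-2-element shapes are unreachable Python-side and map to none = raise);
-- range with step 0 raises ValueError, modelled as none.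
def pvA_part (min_val max_val : Int) (values : PySem.Set Int) (part0 : String) : Option (PySem.Set Int) :=
  let part := PySem.Str.strip part0
  if part.toList.contains '/' then
    match PySem.Str.splitMax? part "/" 1 with
    | some [base, step_str] =>
      match PySem.Int.ofStr? step_str with
      | none => none
      | some step =>
        if base = "*" then
          if step = 0 then none
          else some (PySem.Set.update values (PySem.List.pyRange min_val (max_val + 1) step))
        else if base.toList.contains '-' then
          match PySem.Str.splitMax? base "-" 1 with
          | some [lo, hi] =>
            match PySem.Int.ofStr? lo with
            | none => none
            | some s =>
              match PySem.Int.ofStr? hi with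
              | none => none
              | some e =>
                if step = 0 then none
                else some (PySem.Set.update values (PySem.List.pyRange s (e + 1) step))
          | _ => none
        else
          match PySem.Int.ofStr? base with
          | none => none
          | some s =>
            if step = 0 then none
            else some (PySem.Set.update values (PySem.List.pyRange s (max_val + 1) step))
    | _ => none
  else if part = "*" then
    some (PySem.Set.update values (PySem.List.pyRange min_val (max_val + 1) 1))
  else if part.toList.contains '-' then
    match PySem.Str.splitMax? part "-" 1 with
    | some [lo, hi] =>
      match PySem.Int.ofStr? lo with
      | none => none
      | some l =>
        match PySem.Int.ofStr? hi with
        | none => none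
        | some h => some (PySem.Set.update values (PySem.List.pyRange l (h + 1) 1))
    | _ => none
  else
    match PySem.Int.ofStr? part with
    | none => none
    | some n => some (PySem.Set.add values n)

def parse_cron_field_py (field : String) (min_val : Int) (max_val : Int) : List Int :=
  (((PySem.Str.split? field ",").getD []).foldl
      (fun acc part => acc.bind (fun v => pvA_part min_val max_val v part))
      (some PySem.Set.empty)).getD []

-- ===== PORT B =====
-- str.partition(sep) for a nonempty sep, hand-ported via split(sep, 1): exact, since both cut
-- at the FIRST occurrence of sep and partition returns (s, "", "") when sep is absent.
def pvPartition (s : String) (sep : String) : String × String × String :=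
  match PySem.Str.splitMax? s sep 1 with
  | some [b, a] => (b, sep, a)
  | _ => (s, "", "")

-- the value list of one part: base[, "/", step] read by partition; ValueError (bad int, or
-- range step 0) is none
def pvB_one (min_val max_val : Int) (p : String) : Option (List Int) :=
  match pvPartition (PySem.Str.strip p) "/" with
  | (base, slash, step_str) =>
    match (if slash ≠ "" then PySem.Int.ofStr? step_str else some 1) with
    | none => none
    | some step =>
      match (if base = "*" then some (min_val, max_val)
             else match pvPartition base "-" with
             | (lo, dash, hi) =>
               match PySem.Int.ofStr? lo with
               | none => none
               | some start =>
                 match (if dash ≠ "" then PySem.Int.ofStr? hi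
                        else some (if slash ≠ "" then max_val else start)) with
                 | none => none
                 | some e => some (start, e)) with
      | none => none
      | some (s, e) =>
        if step = 0 then none
        else some (PySem.List.pyRange s (e + 1) step)

-- emit: recursive descent over the comma parts, concatenating the flat value lists
def pvB_emit (min_val max_val : Int) : List String → Option (List Int)
  | [] => some []
  | p :: rest =>
    (pvB_one min_val max_val p).bind fun l =>
      (pvB_emit min_val max_val rest).map fun t => l ++ t

def parse_cron_field_py_alt (field : String) (min_val : Int) (max_val : Int) : List Int :=
  ((pvB_emit min_val max_val ((PySem.Str.split? field ",").getD [])).map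
      PySem.Set.ofList).getD []

-- ===== PRECONDITION & SPEC =====
-- Validity of one comma part: the shape on which A's int() calls succeed and range() gets a
-- nonzero step (everywhere else the Python raises ValueError).
def pvPartOK (part0 : String) : Bool :=
  let part := PySem.Str.strip part0
  let rangeOK : String → Bool := fun base =>
    if base.toList.contains '-' then
      match PySem.Str.splitMax? base "-" 1 with
      | some [lo, hi] => (PySem.Int.ofStr? lo).isSome && (PySem.Int.ofStr? hi).isSome
      | _ => false
    else (PySem.Int.ofStr? base).isSome
  if part.toList.contains '/' then
    match PySem.Str.splitMax? part "/" 1 with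
    | some [base, step_str] =>
      (match PySem.Int.ofStr? step_str with
       | some st => st != 0
       | none => false) && (base = "*" || rangeOK base)
    | _ => false
  else part = "*" || rangeOK part

-- Pre_ excludes exactly the inputs where the Python raises ValueError (malformed part or zero step).
def Pre_parse_cron_field_py (field : String) (min_val : Int) (max_val : Int) : Prop :=
  ((PySem.Str.split? field ",").getD []).all pvPartOK = true
instance (field : String) (min_val : Int) (max_val : Int) : Decidable (Pre_parse_cron_field_py field min_val max_val) := by unfold Pre_parse_cron_field_py; infer_instance

def pvWitness_parse_cron_field_py : String × Int × Int := ("1-5,*/15, 30", 0, 59)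

def Spec_parse_cron_field_py (field : String) (min_val : Int) (max_val : Int) (out : List Int) : Prop := out = parse_cron_field_py_alt field min_val max_val
instance (field : String) (min_val : Int) (max_val : Int) (out : List Int) : Decidable (Spec_parse_cron_field_py field min_val max_val out) := by unfold Spec_parse_cron_field_py; infer_instance

-- ===== CLAIM (what is proved, stated in full; the proofs are below) =====
def Claim_equal_parse_cron_field_py : Prop := ∀ (field : String) (min_val : Int) (max_val : Int), Dom_parse_cron_field_py field min_val max_val → Pre_parse_cron_field_py field min_val max_val → Spec_parse_cron_field_py field min_val max_val (parse_cron_field_py field min_val max_val)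

-- ===== LEMMAS AND PROOFS =====

-- s.split(c, 1) characterised: cut at the first occurrence of the (single) character c
theorem pvGo_zero (c : Char) (fuel : Nat) (l cur : List Char) (acc : List (List Char)) :
    PySem.Chars.splitOnMax.go [c] fuel 0 l cur acc = ((cur.reverse ++ l) :: acc).reverse := by
  cases fuel with
  | zero => rfl
  | succ n => cases l with
    | nil => simp [PySem.Chars.splitOnMax.go]
    | cons a t => simp [PySem.Chars.splitOnMax.go]

theorem pvGo_one (c : Char) : ∀ (l : List Char) (fuel : Nat) (cur : List Char) (acc : List (List Char)),
    l.length ≤ fuel →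
    PySem.Chars.splitOnMax.go [c] fuel 1 l cur acc =
      (if c ∈ l then ((l.dropWhile (· ≠ c)).tail :: (cur.reverse ++ l.takeWhile (· ≠ c)) :: acc)
       else ((cur.reverse ++ l) :: acc)).reverse := by
  intro l
  induction l with
  | nil => intro fuel cur acc h; cases fuel <;> simp [PySem.Chars.splitOnMax.go]
  | cons a t ih =>
    intro fuel cur acc h
    cases fuel with
    | zero => simp at h
    | succ n =>
      by_cases hac : a = c
      · subst hac
        simp [PySem.Chars.splitOnMax.go, List.isPrefixOf, pvGo_zero, List.dropWhile, List.takeWhile]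
      · have hpre : ¬ [c].isPrefixOf (a :: t) = true := by
          simp [List.isPrefixOf]; exact fun hh => hac hh.symm
        simp only [PySem.Chars.splitOnMax.go]
        rw [if_neg (by omega), if_neg hpre]
        rw [ih n (a :: cur) acc (by simpa using h)]
        by_cases hm : c ∈ t
        · simp [hm, hac, Ne.symm hac, List.dropWhile, List.takeWhile]
        · simp [hm, Ne.symm hac]

theorem pvSplitOnMax_one_char (s : List Char) (c : Char) :
    PySem.Chars.splitOnMax s [c] 1 =
      if c ∈ s then [s.takeWhile (· ≠ c), (s.dropWhile (· ≠ c)).tail] else [s] := by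
  unfold PySem.Chars.splitOnMax
  rw [if_neg (by omega), show (Int.toNat 1) = 1 from rfl,
      pvGo_one c s (s.length + 1) [] [] (by omega)]
  by_cases h : c ∈ s <;> simp [h]

theorem pvStrSplit1 (s : String) (sep : String) (c : Char) (hsep : sep.toList = [c]) :
    PySem.Str.splitMax? s sep 1 =
      some (if c ∈ s.toList
            then [String.ofList (s.toList.takeWhile (· ≠ c)),
                  String.ofList ((s.toList.dropWhile (· ≠ c)).tail)]
            else [s]) := by
  unfold PySem.Str.splitMax? PySem.Chars.splitMax?
  rw [hsep]
  rw [if_neg (by simp), pvSplitOnMax_one_char]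
  by_cases h : c ∈ s.toList <;> simp [h]

-- the two per-part computations agree (both none exactly where the Python raises)
theorem pvAB (mn mx : Int) (v : PySem.Set Int) (p : String) :
    pvA_part mn mx v p = (pvB_one mn mx p).map (fun l => PySem.Set.update v l) := by
  unfold pvA_part pvB_one pvPartition
  dsimp only
  generalize PySem.Str.strip p = part
  rw [pvStrSplit1 part "/" '/' rfl]
  by_cases hc : '/' ∈ part.toList
  · have hcontains : part.toList.contains '/' = true := by simpa using hc
    simp only [hc, hcontains, ite_true]
    generalize String.ofList (part.toList.takeWhile (· ≠ '/')) = base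
    generalize String.ofList ((part.toList.dropWhile (· ≠ '/')).tail) = step_str
    cases hst : PySem.Int.ofStr? step_str with
    | none => simp
    | some step =>
      simp only [ne_eq]
      by_cases hb : base = "*"
      · by_cases hz : step = 0 <;> simp [hb, hz]
      · rw [pvStrSplit1 base "-" '-' rfl]
        by_cases hd : '-' ∈ base.toList
        · have hdc : base.toList.contains '-' = true := by simpa using hd
          simp only [hb, hd, hdc, if_true, if_false]
          cases hlo : PySem.Int.ofStr? (String.ofList (base.toList.takeWhile (· ≠ '-'))) with
          | none => simp [hb, hlo]
          | some a =>
            cases hhi : PySem.Int.ofStr? (String.ofList ((base.toList.dropWhile (· ≠ '-')).tail)) with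
            | none => simp [hb, hlo, hhi]
            | some b => by_cases hz : step = 0 <;> simp [hb, hlo, hhi, hz]
        · have hdc : base.toList.contains '-' = false := by simpa using hd
          simp only [hb, hd, hdc, if_false, Bool.false_eq_true]
          cases hn : PySem.Int.ofStr? base with
          | none => simp [hb, hn]
          | some n => by_cases hz : step = 0 <;> simp [hb, hn, hz]
  · have hcontains : part.toList.contains '/' = false := by simpa using hc
    simp only [hc, hcontains, Bool.false_eq_true, if_false, ne_eq, not_true_eq_false]
    by_cases hs : part = "*"
    · simp [hs]
    · rw [pvStrSplit1 part "-" '-' rfl]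
      by_cases hd : '-' ∈ part.toList
      · have hdc : part.toList.contains '-' = true := by simpa using hd
        simp only [hs, hd, hdc, if_true, if_false]
        cases hlo : PySem.Int.ofStr? (String.ofList (part.toList.takeWhile (· ≠ '-'))) with
        | none => simp [hs, hlo]
        | some a =>
          cases hhi : PySem.Int.ofStr? (String.ofList ((part.toList.dropWhile (· ≠ '-')).tail)) with
          | none => simp [hs, hlo, hhi]
          | some b => simp [hs, hlo, hhi]
      · have hdc : part.toList.contains '-' = false := by simpa using hd
        simp only [hs, hd, hdc, Bool.false_eq_true, if_false]
        cases hn : PySem.Int.ofStr? part with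
        | none => simp [hs, hn]
        | some n => simp [PySem.List.pyRange_one_singleton, PySem.Set.update]

theorem pvFoldl_none (g : PySem.Set Int → String → Option (PySem.Set Int)) :
    ∀ (l : List String), l.foldl (fun acc part => acc.bind (fun v => g v part)) none = none := by
  intro l; induction l with
  | nil => rfl
  | cons p rest ih => simpa using ih

theorem pvUpdate_append (v : PySem.Set Int) (l t : List Int) :
    PySem.Set.update v (l ++ t) = PySem.Set.update (PySem.Set.update v l) t := by
  simp [PySem.Set.update, List.foldl_append]

theorem pvFoldA_emit (mn mx : Int) : ∀ (parts : List String) (v : PySem.Set Int),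
    parts.foldl (fun acc part => acc.bind (fun s => pvA_part mn mx s part)) (some v)
      = (pvB_emit mn mx parts).map (fun l => PySem.Set.update v l) := by
  intro parts
  induction parts with
  | nil => intro v; simp [pvB_emit, PySem.Set.update]
  | cons p rest ih =>
    intro v
    simp only [List.foldl_cons, Option.bind_some, pvB_emit]
    rw [pvAB]
    cases h1 : pvB_one mn mx p with
    | none => simpa using pvFoldl_none _ rest
    | some l =>
      simp only [Option.map_some, Option.bind_some]
      rw [ih (PySem.Set.update v l)]
      cases h2 : pvB_emit mn mx rest with
      | none => simp
      | some t => simp [pvUpdate_append]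

-- ===== VERDICT (by name: the statement is the Claim_ definition above) =====
theorem parse_cron_field_py_spec : Claim_equal_parse_cron_field_py := by
  intro field mn mx _ _
  show parse_cron_field_py field mn mx = parse_cron_field_py_alt field mn mx
  unfold parse_cron_field_py parse_cron_field_py_alt
  rw [pvFoldA_emit mn mx _ PySem.Set.empty]
  cases h : pvB_emit mn mx ((PySem.Str.split? field ",").getD []) with
  | none => simp
  | some l => simp [PySem.Set.update, PySem.Set.ofList, PySem.Set.empty]
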